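-- pv_equiv track=rewrite | github.com/v-vskv-v/LongTailRanking | src/semantic.py | make_pair
-- ===== SOURCE A (Python) =====
-- def make_pair(string):
--     tmp = string.strip().split()
--     tmp_p = []
--     for i in range(0, len(tmp)-1, 2):
--         tmp_p.append('{} {}'.format(tmp[i], tmp[i+1]))
--     if len(tmp) % 2 == 1:
--         tmp_p.append(tmp[-1])
--     return tmp_p
-- ===== SOURCE B (Python) =====
-- def make_pair(string):
--     tmp = string.strip().split()
--     pairs = ['{} {}'.format(a, b) for a, b in zip(tmp[::2], tmp[1::2])]
--     if len(tmp) % 2 == 1: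
--         pairs.append(tmp[-1])
--     return pairs
-- ===== Notes on version B (the rewrite author's own statement) =====
-- stated objective: idiomatic
-- what changed: Replaces the step-2 index loop over range(0, len-1, 2) with a zip of the two strided slices tmp[::2] and tmp[1::2], pairing evens and odds positionally instead of indexing.
import Mathlib
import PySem

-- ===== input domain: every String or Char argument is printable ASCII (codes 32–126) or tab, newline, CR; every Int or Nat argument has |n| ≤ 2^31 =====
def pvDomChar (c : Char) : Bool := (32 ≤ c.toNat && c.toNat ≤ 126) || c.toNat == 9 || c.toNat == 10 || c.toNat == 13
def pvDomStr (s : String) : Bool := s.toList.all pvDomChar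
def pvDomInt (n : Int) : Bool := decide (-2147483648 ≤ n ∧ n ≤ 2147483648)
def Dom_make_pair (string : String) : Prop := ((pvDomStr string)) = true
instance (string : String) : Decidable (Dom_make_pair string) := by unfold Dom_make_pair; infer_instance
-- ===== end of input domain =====

-- B pairs consecutive tokens by zipping the two strided slices tmp[::2] and tmp[1::2] instead of A's step-2 index loop (objective: idiomatic).

-- ===== PORT A =====
def make_pair (string : String) : List String :=
  let tmp := PySem.Str.split₀ (PySem.Str.strip string)
  let tmp_p := (PySem.List.pyRange 0 ((tmp.length : Int) - 1) 2).foldl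
    (fun acc i => acc ++
      [PySem.Str.join " " [PySem.List.pyGetD tmp i "", PySem.List.pyGetD tmp (i + 1) ""]]) []
  if PySem.Int.mod (tmp.length : Int) 2 = 1 then tmp_p ++ [PySem.List.pyGetD tmp (-1) ""]
  else tmp_p

-- ===== PORT B =====
def make_pair_alt (string : String) : List String :=
  let tmp := PySem.Str.split₀ (PySem.Str.strip string)
  let pairs := (((PySem.List.slice? tmp none none 2).getD []).zip
                ((PySem.List.slice? tmp (some 1) none 2).getD [])).map
      (fun p => PySem.Str.join " " [p.1, p.2])
  if PySem.Int.mod (tmp.length : Int) 2 = 1 then pairs ++ [PySem.List.pyGetD tmp (-1) ""]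
  else pairs

-- ===== PRECONDITION & SPEC =====
def Spec_make_pair (string : String) (out : List String) : Prop := out = make_pair_alt string
instance (string : String) (out : List String) : Decidable (Spec_make_pair string out) := by unfold Spec_make_pair; infer_instance

-- ===== CLAIM (what is proved, stated in full; the proofs are below) =====
def Claim_equal_make_pair : Prop := ∀ (string : String), Dom_make_pair string → Spec_make_pair string (make_pair string)

-- ===== LEMMAS AND PROOFS =====

-- the k-th pair "tmp[2k] tmp[2k+1]"
def pvPair (tmp : List String) (k : Nat) : String :=
  PySem.Str.join " " [tmp.getD (2 * k) "", tmp.getD (2 * k + 1) ""]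

lemma A_loop_eq (tmp : List String) :
    (PySem.List.pyRange 0 ((tmp.length : Int) - 1) 2).foldl
      (fun acc i => acc ++
        [PySem.Str.join " " [PySem.List.pyGetD tmp i "", PySem.List.pyGetD tmp (i + 1) ""]]) []
    = (List.range (tmp.length / 2)).map (pvPair tmp) := by
  rw [PySem.List.foldl_append_singleton_eq_map, PySem.List.pyRange_of_pos 0 ((tmp.length : Int) - 1) (by norm_num)]
  rw [List.map_map]
  have hc : (if (0:Int) < (tmp.length : Int) - 1 then (((tmp.length : Int) - 1 - 0 + 2 - 1) / 2).toNat else 0)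
      = tmp.length / 2 := by
    split_ifs with h
    · omega
    · omega
  rw [hc]
  apply List.map_congr_left
  intro k _
  simp only [Function.comp_apply, pvPair]
  have h1 : (0 : Int) + 2 * (k : Int) = ((2 * k : Nat) : Int) := by push_cast; ring
  have h2 : ((2 * k : Nat) : Int) + 1 = ((2 * k + 1 : Nat) : Int) := by push_cast; ring
  rw [h1, h2, PySem.List.pyGetD_natCast, PySem.List.pyGetD_natCast]

lemma B_evens_eq (tmp : List String) :
    (PySem.List.slice? tmp none none 2).getD []
    = (List.range ((tmp.length + 1) / 2)).map (fun k => tmp.getD (2 * k) "") := by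
  simp only [PySem.List.slice?, PySem.List.sliceIndices]
  norm_num
  have hc : (if 0 < tmp.length then (((tmp.length : Int) + 2 - 1) / 2).toNat else 0)
      = (tmp.length + 1) / 2 := by split_ifs with h <;> omega
  rw [hc]
  rw [List.filterMap_congr (g := fun k => some (tmp[2 * k]?.getD "")) ?_]
  · exact List.filterMap_eq_map_iff_forall_eq_some.mpr fun x _ => rfl
  · intro k hk
    rw [List.mem_range] at hk
    have hlt : 2 * k < tmp.length := by omega
    have h1 : ((2 : Int) * (k : Int)).toNat = 2 * k := by omega
    simp [h1, List.getElem?_eq_getElem hlt]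

lemma B_odds_eq (tmp : List String) :
    (PySem.List.slice? tmp (some 1) none 2).getD []
    = (List.range (tmp.length / 2)).map (fun k => tmp.getD (2 * k + 1) "") := by
  simp only [PySem.List.slice?, PySem.List.sliceIndices]
  norm_num
  by_cases h0 : tmp.length = 0
  · simp [h0]
  · have hmin : min 1 ((tmp.length : Int)) = 1 := by omega
    rw [hmin]
    have hc : (if 1 < tmp.length then (((tmp.length : Int) - 1 + 2 - 1) / 2).toNat else 0)
        = tmp.length / 2 := by split_ifs with h <;> omega
    rw [hc]
    rw [List.filterMap_congr (g := fun k => some (tmp[2 * k + 1]?.getD "")) ?_]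
    · exact List.filterMap_eq_map_iff_forall_eq_some.mpr fun x _ => rfl
    · intro k hk
      rw [List.mem_range] at hk
      have hlt : 2 * k + 1 < tmp.length := by omega
      have h1 : ((1 : Int) + 2 * (k : Int)).toNat = 2 * k + 1 := by omega
      simp [h1, List.getElem?_eq_getElem hlt]

lemma B_pairs_eq (tmp : List String) :
    (((PySem.List.slice? tmp none none 2).getD []).zip
      ((PySem.List.slice? tmp (some 1) none 2).getD [])).map
      (fun p => PySem.Str.join " " [p.1, p.2])
    = (List.range (tmp.length / 2)).map (pvPair tmp) := by
  rw [B_evens_eq, B_odds_eq]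
  by_cases hpar : tmp.length % 2 = 0
  · have he : (tmp.length + 1) / 2 = tmp.length / 2 := by omega
    rw [he, List.zip_map', List.map_map]
    rfl
  · have he : (tmp.length + 1) / 2 = tmp.length / 2 + 1 := by omega
    rw [he, List.range_succ, List.map_append,
        ← List.append_nil (List.map (fun k => tmp.getD (2 * k + 1) "") (List.range (tmp.length / 2))),
        List.zip_append (by simp), List.zip_map']
    simp only [List.zip_nil_right, List.append_nil, List.map_map]
    rfl

-- ===== VERDICT (by name: the statement is the Claim_ definition above) =====
theorem make_pair_spec : Claim_equal_make_pair := by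
  intro s _
  simp only [Spec_make_pair, make_pair, make_pair_alt, A_loop_eq, B_pairs_eq]
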